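-- pv_equiv track=rewrite | github.com/Amir-rfz/DS | CA1/1.py | misagi_index
-- ===== SOURCE A (Python) =====
-- def misagi_index(string):
--     indexes=[]
--     indexes.append(0)
--     for i in range(len(string)):
--         if(i!=len(string)-1):
--             if(string[i]==string[i+1]):
--                 indexes.append(i+1)
--     indexes.append(len(string))
--
--     return indexes
-- ===== SOURCE B (Python) =====
-- def misagi_index(string):
--     n = len(string)
--     res = [0]
--     i = 0
--     while i < n:
--         j = i + 1
--         while j < n and string[j] == string[i]:
--             j += 1
--         res.extend(range(i + 1, j))
--         i = j
--     res.append(n)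
--     return res
-- ===== Notes on version B (the rewrite author's own statement) =====
-- stated objective: alternative
-- what changed: B scans the string run by run (an inner loop consumes each maximal run of equal characters and the run's interior indices are appended in one extend) instead of A's single per-index loop comparing each character with its successor.
import Mathlib
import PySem

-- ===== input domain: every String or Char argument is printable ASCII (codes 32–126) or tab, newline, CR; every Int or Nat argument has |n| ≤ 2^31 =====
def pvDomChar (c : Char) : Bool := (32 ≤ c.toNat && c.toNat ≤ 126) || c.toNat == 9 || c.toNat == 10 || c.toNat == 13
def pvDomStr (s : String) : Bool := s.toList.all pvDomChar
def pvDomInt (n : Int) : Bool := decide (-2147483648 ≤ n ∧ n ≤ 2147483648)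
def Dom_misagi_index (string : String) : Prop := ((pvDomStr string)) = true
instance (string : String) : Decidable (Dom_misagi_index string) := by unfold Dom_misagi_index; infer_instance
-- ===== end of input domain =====

-- B rewrites A's per-index adjacent-comparison loop as a run-by-run scan (inner loop
-- consumes each maximal run, interior indices appended in one block); alternative, same cost.

-- ===== PORT A =====
-- for i in range(len(string)): if i != len-1 and string[i]==string[i+1]: indexes.append(i+1)
def misagi_index (string : String) : List Int :=
  let cs := string.toList
  let n : Int := (cs.length : Int)
  let indexes : List Int :=
    (List.range cs.length).foldl (fun acc (i : Nat) =>
      if (i : Int) ≠ n - 1 then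
        if cs[i]? = cs[i+1]? then acc ++ [(i : Int) + 1] else acc
      else acc) [0]
  indexes ++ [n]

-- ===== PORT B =====
-- outer while: one recursive step per maximal run (cs is the unscanned suffix, i its start index);
-- inner while 'j < n and string[j] == string[i]' is the takeWhile; res.extend(range(i+1, j)).
def pvRunLoop : List Char → Int → List Int
  | [], _ => []
  | c :: rest, i =>
      let k := (rest.takeWhile (fun d => d == c)).length
      let j : Int := i + 1 + (k : Int)
      PySem.List.pyRange (i + 1) j 1 ++ pvRunLoop (rest.drop k) j
termination_by cs _ => cs.length
decreasing_by
  simp only [List.length_drop, List.length_cons]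
  omega

def misagi_index_alt (string : String) : List Int :=
  let cs := string.toList
  ([(0 : Int)] ++ pvRunLoop cs 0) ++ [(cs.length : Int)]

-- ===== PRECONDITION & SPEC =====
def Spec_misagi_index (string : String) (out : List Int) : Prop := out = misagi_index_alt string
instance (string : String) (out : List Int) : Decidable (Spec_misagi_index string out) := by unfold Spec_misagi_index; infer_instance

-- ===== CLAIM (what is proved, stated in full; the proofs are below) =====
def Claim_equal_misagi_index : Prop := ∀ (string : String), Dom_misagi_index string → Spec_misagi_index string (misagi_index string)

-- ===== LEMMAS AND PROOFS =====

-- common reference: positions i+1 (offset by off) of equal adjacent pairs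
def pvAdj : List Char → Int → List Int
  | [], _ => []
  | [_], _ => []
  | a :: b :: t, off => (if a = b then [off + 1] else []) ++ pvAdj (b :: t) (off + 1)

theorem pvRunLoop_eq_pvAdj (cs : List Char) (i : Int) : pvRunLoop cs i = pvAdj cs i := by
  induction cs generalizing i with
  | nil => simp [pvRunLoop, pvAdj]
  | cons a rest ih =>
    cases rest with
    | nil =>
      simp [pvRunLoop, pvAdj]
    | cons b t =>
      by_cases hab : a = b
      · subst hab
        have hk : (a :: t).takeWhile (fun d => d == a) = a :: t.takeWhile (fun d => d == a) := by
          simp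
        simp only [pvRunLoop, hk, List.length_cons, List.drop_succ_cons, pvAdj]
        have h1 : (i + 1 + (((t.takeWhile (fun d => d == a)).length + 1 : Nat) : Int))
            = (i + 1) + 1 + ((t.takeWhile (fun d => d == a)).length : Int) := by push_cast; omega
        rw [h1, PySem.List.pyRange_one_cons (by omega)]
        have h2 := ih (i + 1)
        simp only [pvRunLoop] at h2
        simp only [List.cons_append, ← h2]
        simp
      · have hb : (b == a) = false := by
          simp only [beq_eq_false_iff_ne]; exact fun h => hab h.symm
        simp only [pvRunLoop, List.takeWhile_cons, hb, Bool.false_eq_true, if_false,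
          List.length_nil, List.drop_zero, Nat.cast_zero, add_zero,
          PySem.List.pyRange_one_eq_nil (le_refl (i + 1)), List.nil_append, ih, pvAdj,
          if_neg hab]

-- A's filtered range equals pvAdj
theorem pvRange_flatMap_eq_pvAdj (cs : List Char) (off : Int) :
    (List.range cs.length).flatMap (fun (i : Nat) =>
      if (i : Int) ≠ (cs.length : Int) - 1 then
        if cs[i]? = cs[i+1]? then [off + (i : Int) + 1] else []
      else []) = pvAdj cs off := by
  induction cs generalizing off with
  | nil => simp [pvAdj]
  | cons a rest ih =>
      rw [List.length_cons, List.range_succ_eq_map, List.flatMap_cons, List.flatMap_map]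
      cases rest with
      | nil => simp [pvAdj]
      | cons b t =>
          have htail : (List.range (b :: t).length).flatMap (fun (i : Nat) =>
              if ((i+1 : Nat) : Int) ≠ ((((b :: t).length + 1 : Nat)) : Int) - 1 then
                if (a :: b :: t)[i+1]? = (a :: b :: t)[i+1+1]? then [off + ((i+1 : Nat) : Int) + 1] else []
              else []) = pvAdj (b :: t) (off + 1) := by
            rw [← ih (off + 1)]
            apply List.flatMap_congr
            intro i _
            have hc : (((i+1 : Nat)) : Int) ≠ ((((b :: t).length + 1 : Nat)) : Int) - 1 ↔
                ((i : Nat) : Int) ≠ (((b :: t).length : Nat) : Int) - 1 := by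
              push_cast; omega
            have hval : off + ((i+1 : Nat) : Int) + 1 = (off + 1) + (i : Int) + 1 := by
              push_cast; omega
            simp only [List.getElem?_cons_succ, hval]
            by_cases h : ((i : Nat) : Int) ≠ (((b :: t).length : Nat) : Int) - 1
            · rw [if_pos (hc.mpr h), if_pos h]
              rfl
            · rw [if_neg (fun hh => h (hc.mp hh)), if_neg h]
          have hhead : (if ((0 : Nat) : Int) ≠ ((((b :: t).length + 1 : Nat)) : Int) - 1 then
              if (a :: b :: t)[0]? = (a :: b :: t)[0+1]? then [off + ((0:Nat) : Int) + 1] else []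
            else []) = (if a = b then [off + 1] else []) := by
            have h0 : ((0 : Nat) : Int) ≠ ((((b :: t).length + 1 : Nat)) : Int) - 1 := by
              simp only [List.length_cons]; push_cast; omega
            rw [if_pos h0]
            by_cases hab : a = b <;> simp [hab]
          simp only [Nat.succ_eq_add_one] at *
          rw [htail, pvAdj, ← hhead]

-- ===== VERDICT (by name: the statement is the Claim_ definition above) =====
theorem misagi_index_spec : Claim_equal_misagi_index := by
  intro s _
  unfold Spec_misagi_index misagi_index misagi_index_alt
  simp only []
  have hfun : (fun (acc : List Int) (i : Nat) =>
      if (i : Int) ≠ (s.toList.length : Int) - 1 then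
        if s.toList[i]? = s.toList[i+1]? then acc ++ [(i : Int) + 1] else acc
      else acc)
    = (fun (acc : List Int) (i : Nat) => acc ++
      (if (i : Int) ≠ (s.toList.length : Int) - 1 then
        if s.toList[i]? = s.toList[i+1]? then [((0:Int) + (i : Int) + 1)] else []
      else [])) := by
    funext acc i
    split_ifs <;> simp
  rw [hfun, PySem.List.foldl_append_eq_flatMap, pvRange_flatMap_eq_pvAdj s.toList 0,
    pvRunLoop_eq_pvAdj]
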